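-- pv_equiv track=rewrite | github.com/wanderer-s/Algorithm | Programmers/Level2/더 맵게/wanderer-s.py | solution
-- ===== SOURCE A (Python) =====
-- import heapq
--
-- def solution(scoville, K):
--   heapq.heapify(scoville)
--
--   cnt = 0
--   while scoville[0] < K:
--     try:
--       first_minimum = heapq.heappop(scoville)
--       second_minimum = heapq.heappop(scoville)
--
--       new_scoville_value = first_minimum + second_minimum * 2
--
--       heapq.heappush(scoville, new_scoville_value)
--     except IndexError:
--       return -1
--
--     cnt += 1
--
--   return cnt
-- ===== SOURCE B (Python) =====
-- from collections import deque
--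
-- def solution(scoville, K):
--     # Two-queue technique (no priority queue): the input is sorted once into a FIFO,
--     # and every mixed value is appended to a second FIFO, which stays nondecreasing
--     # for nonnegative scoville values, so the overall minimum is always one of the
--     # two queue fronts.  Does not mutate `scoville` (A heapifies it in place).
--     orig = deque(sorted(scoville))
--     mixed = deque()
--
--     def pop_min():
--         if orig and (not mixed or orig[0] <= mixed[0]):
--             return orig.popleft()
--         return mixed.popleft()
--
--     def peek_min():
--         if orig and (not mixed or orig[0] <= mixed[0]):
--             return orig[0]
--         return mixed[0]          # IndexError only for an empty scoville, as in A
--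
--     cnt = 0
--     while peek_min() < K:
--         if len(orig) + len(mixed) < 2:
--             return -1
--         first = pop_min()
--         second = pop_min()
--         mixed.append(first + second * 2)
--         cnt += 1
--     return cnt
-- ===== Notes on version B (the rewrite author's own statement) =====
-- stated objective: faster
-- what changed: Replaces the running priority queue entirely by the two-queue technique: the input is sorted once into a FIFO and every mixed value is appended to a second FIFO that provably stays nondecreasing, so each merge step is an O(1) comparison of the two queue fronts instead of heap sift-up/sift-down.
import Mathlib
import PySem

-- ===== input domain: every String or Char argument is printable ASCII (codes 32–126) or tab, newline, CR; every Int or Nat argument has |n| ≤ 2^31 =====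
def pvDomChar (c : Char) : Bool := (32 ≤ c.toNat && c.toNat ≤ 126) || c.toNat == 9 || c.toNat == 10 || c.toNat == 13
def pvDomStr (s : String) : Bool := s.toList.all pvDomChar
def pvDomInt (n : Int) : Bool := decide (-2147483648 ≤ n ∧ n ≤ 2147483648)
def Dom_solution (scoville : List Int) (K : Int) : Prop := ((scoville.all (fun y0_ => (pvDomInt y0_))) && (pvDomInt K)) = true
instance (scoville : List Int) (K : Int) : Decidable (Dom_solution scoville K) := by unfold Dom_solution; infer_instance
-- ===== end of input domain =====

-- B replaces A's binary heap by the two-queue technique: the input is sorted once into a FIFO,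
-- mixed values go to a second FIFO that stays nondecreasing, so each step compares the two fronts.
-- Equivalence is about the RETURN value only: A heapifies `scoville` in place, B does not mutate it.


-- ===== PORT A =====
-- heapq is ported by its contract on a heapified Int list (values only, heap layout not modeled;
-- return-value equivalence only, see header): after heapify, heap[0] is the minimum of the values;
-- heappop removes and returns the smallest value; heappush adds the value.
-- `heapRoot` is that minimum (junk 0 on [], where the Python raises IndexError — excluded by Pre_).
def heapRoot : List Int → Int
  | [] => 0
  | a :: t => t.foldl min a

-- the while loop; fuel `scoville.length + 1` suffices: each iteration shrinks the heap by one.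
-- `h.length < 2` is exactly "the second heappop raises IndexError" (caught: return -1);
-- first_minimum = heapRoot h, second_minimum = heapRoot of the heap after the first pop.
def solGo : Nat → List Int → Int → Int → Int
  | 0, _, _, _ => 0
  | f + 1, h, K, cnt =>
    if heapRoot h < K then
      if h.length < 2 then -1
      else
        solGo f (((h.erase (heapRoot h)).erase (heapRoot (h.erase (heapRoot h)))) ++
          [heapRoot h + heapRoot (h.erase (heapRoot h)) * 2]) K (cnt + 1)
    else cnt

def solution (scoville : List Int) (K : Int) : Int :=
  solGo (scoville.length + 1) scoville K 0

-- ===== PORT B =====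
-- Source B's peek_min: the smaller of the two queue fronts, preferring `orig` on ties
-- (junk 0 when both queues are empty — there Python raises IndexError, excluded by Pre_).
def peekQ (orig mixed : List Int) : Int :=
  match orig, mixed with
  | a :: _, [] => a
  | a :: _, m :: _ => if a ≤ m then a else m
  | [], m :: _ => m
  | [], [] => 0

-- Source B's pop_min: pop the front of `orig` if it is the minimum (ties prefer `orig`), else of `mixed`;
-- returns (popped value, new orig, new mixed).
def popQ (orig mixed : List Int) : Int × List Int × List Int :=
  match orig, mixed with
  | a :: o, [] => (a, o, [])
  | a :: o, m :: mx => if a ≤ m then (a, o, m :: mx) else (m, a :: o, mx)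
  | [], m :: mx => (m, [], mx)
  | [], [] => (0, [], [])

-- the while loop of Source B; fuel `scoville.length + 1` suffices: each iteration shrinks the pool by one.
def altGo : Nat → List Int → List Int → Int → Int → Int
  | 0, _, _, _, _ => 0
  | f + 1, orig, mixed, K, cnt =>
    if peekQ orig mixed < K then
      if orig.length + mixed.length < 2 then -1
      else
        altGo f (popQ (popQ orig mixed).2.1 (popQ orig mixed).2.2).2.1
          ((popQ (popQ orig mixed).2.1 (popQ orig mixed).2.2).2.2 ++
            [(popQ orig mixed).1 + (popQ (popQ orig mixed).2.1 (popQ orig mixed).2.2).1 * 2])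
          K (cnt + 1)
    else cnt

def solution_alt (scoville : List Int) (K : Int) : Int :=
  altGo ((PySem.List.sorted scoville (fun x => x) false).length + 1)
    (PySem.List.sorted scoville (fun x => x) false) [] K 0

-- ===== PRECONDITION & SPEC =====
-- Pre_ excludes only the empty list, on which both Pythons raise IndexError reading the front.
def Pre_solution (scoville : List Int) (K : Int) : Prop := scoville ≠ []
instance (scoville : List Int) (K : Int) : Decidable (Pre_solution scoville K) := by
  unfold Pre_solution; infer_instance
def pvWitness_solution : List Int × Int := ([1, 2, 3, 9, 10, 12], 7)

def Spec_solution (scoville : List Int) (K : Int) (out : Int) : Prop := out = solution_alt scoville K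
instance (scoville : List Int) (K : Int) (out : Int) : Decidable (Spec_solution scoville K out) := by
  unfold Spec_solution; infer_instance

-- ===== CLAIM (what is proved, stated in full; the proofs are below) =====
def Claim_equal_solution : Prop := ∀ (scoville : List Int) (K : Int), Dom_solution scoville K → Pre_solution scoville K → Spec_solution scoville K (solution scoville K)

-- ===== LEMMAS AND PROOFS =====
theorem heapRoot_perm {h1 h2 : List Int} (p : h1.Perm h2) : heapRoot h1 = heapRoot h2 := by
  induction p with
  | nil => rfl
  | cons x pp ih =>
    show List.foldl min x _ = List.foldl min x _
    exact pp.foldl_eq x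
  | swap x y l =>
    show List.foldl min y (x :: l) = List.foldl min x (y :: l)
    simp only [List.foldl_cons]
    rw [min_comm]
  | trans _ _ ih1 ih2 => exact ih1.trans ih2

theorem foldl_min_of_le {t : List Int} {a : Int} (h : ∀ x ∈ t, a ≤ x) :
    List.foldl min a t = a := by
  induction t with
  | nil => rfl
  | cons b t ih =>
    simp only [List.foldl_cons]
    rw [min_eq_left (h b (by simp))]
    exact ih (fun x hx => h x (by simp [hx]))

theorem heapRoot_head {h : List Int} {a : Int} {rest : List Int}
    (p : h.Perm (a :: rest)) (hs : ∀ x ∈ rest, a ≤ x) : heapRoot h = a := by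
  rw [heapRoot_perm p]
  exact foldl_min_of_le hs

theorem foldl_min_le_init (t : List Int) (c : Int) : List.foldl min c t ≤ c := by
  induction t generalizing c with
  | nil => exact le_refl c
  | cons b t ih => exact le_trans (ih (min c b)) (min_le_left c b)

theorem foldl_min_le (t : List Int) (a y : Int) (hy : y ∈ a :: t) :
    List.foldl min a t ≤ y := by
  induction t generalizing a with
  | nil => simp at hy; simp [hy]
  | cons b t ih =>
    rcases List.mem_cons.1 hy with rfl | hy'
    · exact le_trans (foldl_min_le_init (b :: t) y) (le_refl y)
    · rcases List.mem_cons.1 hy' with rfl | hy'' 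
      · exact le_trans (foldl_min_le_init t (min a y)) (min_le_right a y)
      · exact ih (min a b) (List.mem_cons_of_mem _ hy'')

theorem heapRoot_le_mem {l : List Int} {y : Int} (hy : y ∈ l) : heapRoot l ≤ y := by
  cases l with
  | nil => cases hy
  | cons a t => exact foldl_min_le t a y hy

theorem foldl_min_mem (t : List Int) (a : Int) : List.foldl min a t ∈ a :: t := by
  induction t generalizing a with
  | nil => simp
  | cons b t ih =>
    show List.foldl min (min a b) t ∈ a :: b :: t
    have h := ih (min a b)
    rcases List.mem_cons.1 h with h' | h'
    · rw [h']
      rcases min_cases a b with ⟨he, _⟩ | ⟨he, _⟩ <;> rw [he] <;> simp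
    · simp [h']

theorem heapRoot_mem {l : List Int} (hne : l ≠ []) : heapRoot l ∈ l := by
  cases l with
  | nil => exact absurd rfl hne
  | cons a t => exact foldl_min_mem t a

-- popQ pops the overall minimum (ties to `orig`'s front): value, remaining pool, shape.
theorem popQ_spec {orig mixed : List Int}
    (ho : orig.Pairwise (· ≤ ·)) (hm : mixed.Pairwise (· ≤ ·))
    (hne : orig ++ mixed ≠ []) :
    (popQ orig mixed).1 = heapRoot (orig ++ mixed) ∧
    (popQ orig mixed).2.1 ++ (popQ orig mixed).2.2 =
      (orig ++ mixed).erase ((popQ orig mixed).1) ∧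
    (popQ orig mixed).2.1.Pairwise (· ≤ ·) ∧
    (popQ orig mixed).2.2.Pairwise (· ≤ ·) ∧
    (((popQ orig mixed).2.2 = mixed ∧ orig = (popQ orig mixed).1 :: (popQ orig mixed).2.1) ∨
     (mixed = (popQ orig mixed).1 :: (popQ orig mixed).2.2 ∧ (popQ orig mixed).2.1 = orig)) := by
  cases orig with
  | nil =>
    cases mixed with
    | nil => exact absurd rfl hne
    | cons m mx =>
      refine ⟨?_, by simp [popQ], by simp [popQ], ?_, Or.inr ⟨rfl, rfl⟩⟩
      · exact (heapRoot_head (List.Perm.refl _)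
          (fun x hx => (List.pairwise_cons.1 hm).1 x hx)).symm
      · simpa [popQ] using (List.pairwise_cons.1 hm).2
  | cons a o =>
    cases mixed with
    | nil =>
      refine ⟨?_, by simp [popQ], ?_, by simp [popQ], Or.inl ⟨rfl, rfl⟩⟩
      · exact (heapRoot_head (List.Perm.refl _)
          (fun x hx => (List.pairwise_cons.1 ho).1 x (by simpa using hx))).symm
      · simpa [popQ] using (List.pairwise_cons.1 ho).2
    | cons m mx =>
      by_cases ham : a ≤ m
      · have hmin : ∀ x ∈ o ++ (m :: mx), a ≤ x := by
          intro x hx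
          rcases List.mem_append.1 hx with hx | hx
          · exact (List.pairwise_cons.1 ho).1 x hx
          · rcases List.mem_cons.1 hx with rfl | hx
            · exact ham
            · exact le_trans ham ((List.pairwise_cons.1 hm).1 x hx)
        refine ⟨?_, by simp [popQ, ham], ?_, ?_, ?_⟩
        · simp only [popQ, if_pos ham]
          exact (heapRoot_head (List.Perm.refl _) hmin).symm
        · simpa [popQ, ham] using (List.pairwise_cons.1 ho).2
        · simpa [popQ, ham] using hm
        · exact Or.inl (by simp [popQ, ham])
      · have hma : m < a := not_le.mp ham
        have hmin : ∀ x ∈ (a :: o) ++ mx, m ≤ x := by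
          intro x hx
          rcases List.mem_append.1 hx with hx | hx
          · rcases List.mem_cons.1 hx with rfl | hx
            · exact le_of_lt hma
            · exact le_trans (le_of_lt hma) ((List.pairwise_cons.1 ho).1 x hx)
          · exact (List.pairwise_cons.1 hm).1 x hx
        have hnm : m ∉ a :: o := by
          intro hmem
          rcases List.mem_cons.1 hmem with h' | h'
          · exact absurd h' (ne_of_lt hma)
          · exact absurd ((List.pairwise_cons.1 ho).1 m h') (not_le.mpr hma)
        refine ⟨?_, ?_, ?_, ?_, ?_⟩
        · simp only [popQ, if_neg ham]
          exact (heapRoot_head List.perm_middle hmin).symm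
        · simp only [popQ, if_neg ham]
          rw [List.erase_append_right _ hnm, List.erase_cons_head]
        · simpa [popQ, ham] using ho
        · simpa [popQ, ham] using (List.pairwise_cons.1 hm).2
        · exact Or.inr (by simp [popQ, ham])

theorem peekQ_eq_popQ_fst (orig mixed : List Int) (hne : orig ++ mixed ≠ []) :
    peekQ orig mixed = (popQ orig mixed).1 := by
  cases orig with
  | nil =>
    cases mixed with
    | nil => exact absurd rfl hne
    | cons m mx => rfl
  | cons a o =>
    cases mixed with
    | nil => rfl
    | cons m mx =>
      simp only [peekQ, popQ]
      split <;> rfl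

theorem popQ_nil_snd (o : List Int) : (popQ o []).2.2 = [] := by
  cases o <;> rfl

-- the two-queue invariant: every element of `mixed` that survives the next two pops
-- is at most the value those pops mix (so the mixed queue stays nondecreasing).
def Phi (orig mixed : List Int) : Prop :=
  2 ≤ orig.length + mixed.length →
  ∀ x ∈ (popQ (popQ orig mixed).2.1 (popQ orig mixed).2.2).2.2,
    x ≤ (popQ orig mixed).1 + (popQ (popQ orig mixed).2.1 (popQ orig mixed).2.2).1 * 2

theorem go_eq (f : Nat) : ∀ (h orig mixed : List Int) (K cnt : Int),
    h.Perm (orig ++ mixed) →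
    orig.Pairwise (· ≤ ·) → mixed.Pairwise (· ≤ ·) →
    Phi orig mixed →
    orig ++ mixed ≠ [] →
    solGo f h K cnt = altGo f orig mixed K cnt := by
  induction f with
  | zero => intro h orig mixed K cnt _ _ _ _ _; rfl
  | succ f ih =>
    intro h orig mixed K cnt hp ho hm hphi hne
    have hroot : heapRoot h = heapRoot (orig ++ mixed) := heapRoot_perm hp
    obtain ⟨h1v, h1e, h1o, h1m, h1d⟩ := popQ_spec ho hm hne
    have hpeek : peekQ orig mixed = heapRoot (orig ++ mixed) :=
      (peekQ_eq_popQ_fst orig mixed hne).trans h1v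
    have hlenh : h.length = orig.length + mixed.length := by
      rw [hp.length_eq, List.length_append]
    simp only [solGo, altGo, hroot, hpeek, hlenh]
    by_cases hK : heapRoot (orig ++ mixed) < K
    · rw [if_pos hK, if_pos hK]
      by_cases hlen : orig.length + mixed.length < 2
      · rw [if_pos hlen, if_pos hlen]
      · rw [if_neg hlen, if_neg hlen]
        have hlen2 : 2 ≤ orig.length + mixed.length := not_lt.mp hlen
        -- first pop
        have hamem : (popQ orig mixed).1 ∈ orig ++ mixed := h1v ▸ heapRoot_mem hne
        have hlen1 : (popQ orig mixed).2.1.length + (popQ orig mixed).2.2.length + 1 =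
            orig.length + mixed.length := by
          have := congrArg List.length h1e
          rw [List.length_append, List.length_erase_of_mem hamem, List.length_append] at this
          omega
        have hne1 : (popQ orig mixed).2.1 ++ (popQ orig mixed).2.2 ≠ [] := by
          intro hnil
          have hl := congrArg List.length hnil
          rw [List.length_append] at hl
          simp only [List.length_nil] at hl
          omega
        obtain ⟨h2v, h2e, h2o, h2m, h2d⟩ := popQ_spec h1o h1m hne1
        set a := (popQ orig mixed).1 with ha
        set o1 := (popQ orig mixed).2.1 with ho1
        set m1 := (popQ orig mixed).2.2 with hm1
        set b := (popQ o1 m1).1 with hb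
        set o2 := (popQ o1 m1).2.1 with ho2
        set m2 := (popQ o1 m1).2.2 with hm2
        set v := a + b * 2 with hv
        -- A's two popped values coincide with B's
        have heA1 : h.erase (heapRoot (orig ++ mixed)) = h.erase a := by rw [h1v]
        have hpe1 : (h.erase a).Perm (o1 ++ m1) := by
          rw [h1e]
          exact hp.erase a
        have heA2 : heapRoot (h.erase a) = b := by
          rw [heapRoot_perm hpe1, h2v]
        -- survivors of the two pops are at least b
        have hsurv : ∀ y ∈ o2 ++ m2, b ≤ y := by
          intro y hy
          rw [h2e] at hy
          exact h2v ▸ heapRoot_le_mem (List.mem_of_mem_erase hy)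
        have hab : a ≤ b := by
          have hbmem : b ∈ o1 ++ m1 := h2v ▸ heapRoot_mem hne1
          rw [h1e] at hbmem
          exact h1v ▸ heapRoot_le_mem (List.mem_of_mem_erase hbmem)
        -- Phi at the current state gives: surviving mixed elements are ≤ v
        have hmix_le : ∀ x ∈ m2, x ≤ v := fun x hx => hphi hlen2 x hx
        -- sortedness of the new mixed queue
        have hmv : (m2 ++ [v]).Pairwise (· ≤ ·) := by
          rw [List.pairwise_append]
          exact ⟨h2m, List.pairwise_singleton _ _, by
            intro x hx y hy
            rw [List.mem_singleton] at hy
            exact hy ▸ hmix_le x hx⟩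
        -- permutation of the new pools
        have hpnew : (((h.erase a).erase b) ++ [v]).Perm (o2 ++ (m2 ++ [v])) := by
          rw [← List.append_assoc]
          refine List.Perm.append_right [v] ?_
          rw [h2e]
          exact hpe1.erase b
        -- the new pool is nonempty
        have hnenew : o2 ++ (m2 ++ [v]) ≠ [] := by simp
        -- the invariant at the new state
        have hphinew : Phi o2 (m2 ++ [v]) := by
          intro hlen2' x hx
          have hne1' : o2 ++ (m2 ++ [v]) ≠ [] := hnenew
          obtain ⟨g1v, g1e, g1o, g1m, g1d⟩ := popQ_spec h2o hmv hne1'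
          have hamem' : (popQ o2 (m2 ++ [v])).1 ∈ o2 ++ (m2 ++ [v]) :=
            g1v ▸ heapRoot_mem hne1'
          have hlen1' : (popQ o2 (m2 ++ [v])).2.1.length + (popQ o2 (m2 ++ [v])).2.2.length + 1 =
              o2.length + (m2 ++ [v]).length := by
            have := congrArg List.length g1e
            rw [List.length_append, List.length_erase_of_mem hamem', List.length_append] at this
            omega
          have hne2' : (popQ o2 (m2 ++ [v])).2.1 ++ (popQ o2 (m2 ++ [v])).2.2 ≠ [] := by
            intro hnil
            have hl := congrArg List.length hnil
            rw [List.length_append] at hl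
            simp only [List.length_nil] at hl
            omega
          obtain ⟨g2v, g2e, g2o, g2m, g2d⟩ :=
            popQ_spec g1o g1m hne2'
          set a' := (popQ o2 (m2 ++ [v])).1 with ha'
          set o1' := (popQ o2 (m2 ++ [v])).2.1 with ho1'
          set m1' := (popQ o2 (m2 ++ [v])).2.2 with hm1'
          set b' := (popQ o1' m1').1 with hb'
          set m2' := (popQ o1' m1').2.2 with hm2'
          -- x is an old mixed survivor or the fresh value v: either way x ≤ v
          have hsub1 : m1' ⊆ m2 ++ [v] := by
            rcases g1d with ⟨he, _⟩ | ⟨he, _⟩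
            · exact he ▸ List.Subset.refl _
            · rw [he]; exact List.subset_cons_self _ _
          have hxv : x ≤ v := by
            have hxmem : x ∈ m2 ++ [v] := by
              apply hsub1
              rcases g2d with ⟨he, _⟩ | ⟨he, _⟩
              · exact he ▸ hx
              · rw [he]; exact List.mem_cons_of_mem _ hx
            rcases List.mem_append.1 hxmem with hxm | hxm
            · exact hmix_le x hxm
            · rw [List.mem_singleton] at hxm; exact le_of_eq hxm
          -- in every non-vacuous pop combination both popped values are ≥ b
          have hkey : b ≤ a' ∧ b ≤ b' := by
            rcases g1d with ⟨he1, he1o⟩ | ⟨he1, he1o⟩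
            · -- first pop from the orig side: a' is o2's front
              have ha'mem : a' ∈ o2 := he1o ▸ List.mem_cons_self
              rcases g2d with ⟨he2, he2o⟩ | ⟨he2, he2o⟩
              · -- second pop from the orig side too
                have hb'mem : b' ∈ o2 := by
                  rw [he1o]
                  exact List.mem_cons_of_mem _ (he2o ▸ List.mem_cons_self)
                exact ⟨hsurv a' (List.mem_append_left _ ha'mem),
                       hsurv b' (List.mem_append_left _ hb'mem)⟩
              · -- second pop from the mixed side: b' is the front of m1' = m2 ++ [v]
                have hE : m2 ++ [v] = b' :: m2' := he1.symm.trans he2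
                cases hm2c : m2 with
                | nil =>
                  rw [hm2c, List.nil_append] at hE
                  injection hE with hE1 hE2
                  rw [← hE2] at hx
                  cases hx
                | cons c t =>
                  rw [hm2c, List.cons_append] at hE
                  injection hE with hE1 hE2
                  have hb'm : b' ∈ m2 := by
                    rw [hm2c, ← hE1]
                    exact List.mem_cons_self
                  exact ⟨hsurv a' (List.mem_append_left _ ha'mem),
                         hsurv b' (List.mem_append_right _ hb'm)⟩
            · -- first pop from the mixed side: a' is the front of m2 ++ [v]
              rcases g2d with ⟨he2, he2o⟩ | ⟨he2, he2o⟩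
              · -- second pop from the orig side
                have hb'mem : b' ∈ o2 := by
                  rw [← he1o]
                  exact he2o ▸ List.mem_cons_self
                cases hm2c : m2 with
                | nil =>
                  rw [hm2c, List.nil_append] at he1
                  injection he1 with hE1 hE2
                  rw [he2, ← hE2] at hx
                  cases hx
                | cons c t =>
                  rw [hm2c, List.cons_append] at he1
                  injection he1 with hE1 hE2
                  have ha'm : a' ∈ m2 := by
                    rw [hm2c, ← hE1]
                    exact List.mem_cons_self
                  exact ⟨hsurv a' (List.mem_append_right _ ha'm),
                         hsurv b' (List.mem_append_left _ hb'mem)⟩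
              · -- both pops from the mixed side
                cases hm2c : m2 with
                | nil =>
                  rw [hm2c, List.nil_append] at he1
                  injection he1 with hE1 hE2
                  rw [← hE2] at he2
                  cases he2
                | cons c t =>
                  rw [hm2c, List.cons_append] at he1
                  injection he1 with hE1 hE2
                  have hF : t ++ [v] = b' :: m2' := hE2.trans he2
                  cases htc : t with
                  | nil =>
                    rw [htc, List.nil_append] at hF
                    injection hF with hF1 hF2
                    rw [← hF2] at hx
                    cases hx
                  | cons d t2 =>
                    rw [htc, List.cons_append] at hF
                    injection hF with hF1 hF2
                    have ha'm : a' ∈ m2 := by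
                      rw [hm2c, ← hE1]
                      exact List.mem_cons_self
                    have hb'm : b' ∈ m2 := by
                      rw [hm2c, htc, ← hF1]
                      exact List.mem_cons_of_mem _ List.mem_cons_self
                    exact ⟨hsurv a' (List.mem_append_right _ ha'm),
                           hsurv b' (List.mem_append_right _ hb'm)⟩
          have : v ≤ a' + b' * 2 := by
            rw [hv]
            have h1 := hab
            have h2 := hkey.1
            have h3 := hkey.2
            omega
          omega
        rw [heA1, heA2, ← h1v]
        exact ih _ o2 (m2 ++ [v]) K (cnt + 1) hpnew h2o hmv hphinew hnenew
    · rw [if_neg hK, if_neg hK]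

-- ===== VERDICT (by name: the statement is the Claim_ definition above) =====
theorem solution_spec : Claim_equal_solution := by
  intro scoville K _ hpre
  unfold Spec_solution solution solution_alt
  have hperm0 : scoville.Perm (PySem.List.sorted scoville (fun x => x) false) :=
    (PySem.List.sorted_perm scoville (fun x => x) false).symm
  have hperm : scoville.Perm ((PySem.List.sorted scoville (fun x => x) false) ++ []) := by
    rw [List.append_nil]; exact hperm0
  rw [← hperm0.length_eq]
  refine go_eq (scoville.length + 1) _ _ _ K 0 hperm
    (PySem.List.sorted_pairwise scoville (fun x => x)) (List.Pairwise.nil) ?_ ?_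
  · intro _ x hx
    rw [popQ_nil_snd, popQ_nil_snd] at hx
    cases hx
  · rw [List.append_nil]
    intro hnil
    exact hpre (List.Perm.nil_eq (hnil ▸ hperm0.symm)).symm
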